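-- pv_equiv track=rewrite | github.com/ep-eaglepoint-ai/bd_datasets_003 | 80m8fv-text-stream-optimization-eliminating-pop-and-string-concatenation/repository_after/main.py | sanitize_chat_stream
-- ===== SOURCE A (Python) =====
-- from typing import List
--
-- def sanitize_chat_stream(messages: List[str], banned_words: List[str]) -> str:
--     """
--     Optimized O(N) chat stream sanitizer.
--
--     Optimizations:
--     1. Direct iteration over messages for O(N) processing
--     2. String builder pattern - list + join instead of concatenation for O(N) assembly
--     3. Hash set lookup - O(1) banned word check instead of O(M) linear scan
--
--     Args:
--         messages: List of chat messages to process
--         banned_words: List of profanity words to censor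
--
--     Returns:
--         Sanitized chat stream with newline-separated messages
--     """
--     # Requirement 3 & 4: Convert banned words to hash set for O(1) lookup
--     # Pre-lowercase for case-insensitive matching
--     banned_set = {word.lower() for word in banned_words}
--
--     # Requirement 2: Use list to collect results (string builder pattern)
--     result_lines = []
--     last_message = None
--
--     # Requirement 1: Direct iteration for efficient processing
--     # Requirement 7: Single pass processing
--     for current_msg in messages:
--         # Requirement 5: Preserve consecutive duplicate filter
--         if current_msg == last_message:
--             continue
--
--         # Requirement 6: Profanity filter via splitting (no regex)
--         # Requirement 3: O(1) hash set lookup for banned words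
--         words = current_msg.split()
--         clean_words = []
--
--         for word in words:
--             # Requirement 4: Case-insensitive set lookup
--             if word.lower() in banned_set:
--                 clean_words.append("*" * len(word))
--             else:
--                 clean_words.append(word)
--
--         processed_line = " ".join(clean_words)
--         result_lines.append(processed_line)
--         last_message = current_msg
--
--     # Requirement 2: Join at the end instead of concatenating in loop
--     return "\n".join(result_lines) + "\n" if result_lines else ""
-- ===== SOURCE B (Python) =====
-- def _censor(line, banned):
--     # Streaming character automaton: scan the line once, buffering the current
--     # word's characters; on whitespace, flush the buffer (masked if banned),
--     # inserting the single-space separator inline. No split()/word list.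
--     pieces = []
--     word = []
--     for ch in line + " ":  # trailing sentinel space flushes the final word
--         if ch.isspace():
--             if word:
--                 w = "".join(word)
--                 if pieces:
--                     pieces.append(" ")
--                 pieces.append("*" * len(w) if w.lower() in banned else w)
--                 word = []
--         else:
--             word.append(ch)
--     return "".join(pieces)
--
--
-- def sanitize_chat_stream(messages, banned_words):
--     banned = {w.lower() for w in banned_words}
--     kept = [m for m, prev in zip(messages, [None] + messages) if m != prev]
--     return "".join(_censor(m, banned) + "\n" for m in kept)
-- ===== Notes on version B (the rewrite author's own statement) =====
-- stated objective: alternative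
-- what changed: Censoring no longer splits each message into a word list and rejoins it: B runs a single streaming character automaton per line (buffering the current word, flushing it masked-or-not with inline separators), and consecutive-duplicate removal is a stateless pairwise zip(messages, [None]+messages) filter instead of A's mutable last_message tracking; the result is assembled as ''.join(line+'\n') with no conditional trailing-newline fixup.
import Mathlib
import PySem

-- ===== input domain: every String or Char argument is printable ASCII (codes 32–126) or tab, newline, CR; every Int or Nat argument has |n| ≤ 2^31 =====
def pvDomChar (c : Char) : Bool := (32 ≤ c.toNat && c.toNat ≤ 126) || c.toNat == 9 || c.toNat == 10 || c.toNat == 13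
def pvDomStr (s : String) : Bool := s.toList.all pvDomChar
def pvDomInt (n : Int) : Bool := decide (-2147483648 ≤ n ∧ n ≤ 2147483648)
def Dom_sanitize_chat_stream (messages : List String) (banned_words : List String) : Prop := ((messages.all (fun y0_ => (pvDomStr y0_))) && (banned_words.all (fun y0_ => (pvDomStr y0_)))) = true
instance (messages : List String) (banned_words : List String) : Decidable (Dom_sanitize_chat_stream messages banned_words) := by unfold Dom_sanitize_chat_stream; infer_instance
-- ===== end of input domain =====

-- B censors each line with a single streaming character automaton (no split()/word
-- list) and drops consecutive duplicates by a stateless pairwise zip filter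
-- (alternative decomposition, same asymptotic cost). Return value only; no mutation.

-- ===== PORT A =====
-- inner 'for word in words' loop of A, with its clean_words accumulator
def pvCleanWordsA (banned_set : PySem.Set String) (words : List String) : List String :=
  words.foldl (fun clean_words word =>
    if PySem.Set.contains banned_set (PySem.Str.lower word) then
      clean_words ++ [String.ofList (List.replicate (PySem.Str.len word).toNat '*')]
    else
      clean_words ++ [word]) []

def sanitize_chat_stream (messages : List String) (banned_words : List String) : String :=
  let banned_set : PySem.Set String := PySem.Set.ofList (banned_words.map PySem.Str.lower)
  let r := messages.foldl
    (fun (st : List String × Option String) current_msg =>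
      if (some current_msg == st.2) then st
      else
        let words := PySem.Str.split₀ current_msg
        let clean_words := pvCleanWordsA banned_set words
        let processed_line := PySem.Str.join " " clean_words
        (st.1 ++ [processed_line], some current_msg))
    ([], none)
  if r.1.isEmpty then "" else PySem.Str.join "\n" r.1 ++ "\n"

-- ===== PORT B =====
-- the masked piece appended when _censor flushes a (nonempty) word buffer
def pvMaskB (banned : PySem.Set String) (w : List Char) : List Char :=
  if PySem.Set.contains banned (String.ofList (PySem.Chars.lower w)) then
    List.replicate w.length '*'
  else w

-- one step of _censor's for-loop: state = (pieces, word)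
def pvCensorStep (banned : PySem.Set String) (st : List (List Char) × List Char) (ch : Char) :
    List (List Char) × List Char :=
  if PySem.Chars.isspace ch then
    if st.2.isEmpty then st
    else ((if st.1.isEmpty then st.1 else st.1 ++ [[' ']]) ++ [pvMaskB banned st.2], [])
  else (st.1, st.2 ++ [ch])

-- _censor of Source B: scan line + " ", then "".join(pieces)
def pvCensorB (banned : PySem.Set String) (line : String) : String :=
  String.ofList (PySem.Chars.join []
    (((line.toList ++ [' ']).foldl (pvCensorStep banned) ([], [])).1))

def sanitize_chat_stream_alt (messages : List String) (banned_words : List String) : String :=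
  let banned : PySem.Set String := PySem.Set.ofList (banned_words.map PySem.Str.lower)
  let kept := ((messages.zip ((none : Option String) :: messages.map some)).filter
      (fun p => !(some p.1 == p.2))).map (·.1)
  PySem.Str.join "" (kept.map (fun m => pvCensorB banned m ++ "\n"))

-- ===== PRECONDITION & SPEC =====
def Spec_sanitize_chat_stream (messages : List String) (banned_words : List String) (out : String) : Prop := out = sanitize_chat_stream_alt messages banned_words
instance (messages : List String) (banned_words : List String) (out : String) : Decidable (Spec_sanitize_chat_stream messages banned_words out) := by unfold Spec_sanitize_chat_stream; infer_instance

-- ===== CLAIM (what is proved, stated in full; the proofs are below) =====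
def Claim_equal_sanitize_chat_stream : Prop := ∀ (messages : List String) (banned_words : List String), Dom_sanitize_chat_stream messages banned_words → Spec_sanitize_chat_stream messages banned_words (sanitize_chat_stream messages banned_words)

-- ===== LEMMAS AND PROOFS =====

-- the token stream of cs with a pending word buffer 'word' (what split() yields)
def pvTok : List Char → List Char → List (List Char)
  | [], word => if word.isEmpty then [] else [word]
  | c :: rest, word =>
      if PySem.Chars.isspace c then
        (if word.isEmpty then pvTok rest [] else word :: pvTok rest [])
      else pvTok rest (word ++ [c])

theorem split₀_go_eq (cs : List Char) : ∀ (cur : List Char) (acc : List (List Char)),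
    PySem.Chars.split₀.go cs cur acc = acc.reverse ++ pvTok cs cur.reverse := by
  induction cs with
  | nil =>
    intro cur acc
    simp [PySem.Chars.split₀.go, pvTok]
    by_cases h : cur = []
    · simp [h]
    · simp [h]
  | cons c rest ih =>
    intro cur acc
    simp only [PySem.Chars.split₀.go, pvTok]
    by_cases hs : PySem.Chars.isspace c
    · by_cases h : cur = []
      · simp [hs, h, ih]
      · simp [hs, h, ih]
    · simp [hs, ih, List.reverse_cons]

theorem split₀_eq_tok (cs : List Char) : PySem.Chars.split₀ cs = pvTok cs [] := by
  simpa using split₀_go_eq cs [] []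

-- generic cons form of join
theorem join_cons (sep p : List Char) (l : List (List Char)) :
    PySem.Chars.join sep (p :: l) = p ++ (if l.isEmpty then [] else sep ++ PySem.Chars.join sep l) := by
  cases l with
  | nil => simp [PySem.Chars.join_singleton]
  | cons q rest => simp [PySem.Chars.join_cons_cons]

theorem join_nil_flatten (l : List (List Char)) :
    PySem.Chars.join [] l = l.flatten := by
  induction l with
  | nil => simp [PySem.Chars.join_nil]
  | cons p rest ih =>
    cases rest with
    | nil => simp [PySem.Chars.join_singleton]
    | cons q r => rw [PySem.Chars.join_cons_cons] at *; simp_all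

-- the censor fold computes the space-joined masked token stream
theorem censor_fold_eq (banned : PySem.Set String) (cs : List Char) :
    ∀ (word : List Char) (pieces : List (List Char)),
    PySem.Chars.join [] (((cs ++ [' ']).foldl (pvCensorStep banned) (pieces, word)).1)
      = PySem.Chars.join [] pieces ++
        (if (pvTok cs word).isEmpty then []
         else (if pieces.isEmpty then [] else [' ']) ++
              PySem.Chars.join [' '] ((pvTok cs word).map (pvMaskB banned))) := by
  have hsp : PySem.Chars.isspace ' ' = true := by decide
  induction cs with
  | nil =>
    intro word pieces
    by_cases hw : word = []
    · simp [hw, pvCensorStep, pvTok, hsp]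
    · simp only [List.nil_append, List.foldl_cons, List.foldl_nil, pvCensorStep, hsp,
        List.isEmpty_iff, hw, if_true]
      simp only [pvTok, List.isEmpty_iff, hw]
      by_cases hp : pieces = [] <;>
        simp [hp, PySem.Chars.join_singleton, join_nil_flatten]
  | cons c rest ih =>
    intro word pieces
    simp only [List.cons_append, List.foldl_cons]
    by_cases hs : PySem.Chars.isspace c
    · by_cases hw : word = []
      · simp only [pvCensorStep, hs, if_true, hw, List.isEmpty_nil, pvTok]
        simpa using ih [] pieces
      · have hstep : pvCensorStep banned (pieces, word) c
            = ((if pieces.isEmpty then pieces else pieces ++ [[' ']]) ++ [pvMaskB banned word], []) := by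
          simp [pvCensorStep, hs, hw]
        rw [hstep, ih]
        have htok : pvTok (c :: rest) word = word :: pvTok rest [] := by
          simp [pvTok, hs, hw]
        rw [htok, List.map_cons, join_cons]
        by_cases hp : pieces = [] <;> by_cases ht : pvTok rest [] = [] <;>
          simp [hp, ht, join_nil_flatten, PySem.Chars.join_singleton]
    · simp only [pvCensorStep, hs, pvTok]
      exact ih (word ++ [c]) pieces

-- per-line: B's automaton = " ".join of masked tokens
theorem censorB_chars (banned : PySem.Set String) (line : String) :
    (pvCensorB banned line).toList
      = PySem.Chars.join [' '] ((PySem.Chars.split₀ line.toList).map (pvMaskB banned)) := by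
  unfold pvCensorB
  rw [String.toList_ofList, censor_fold_eq, split₀_eq_tok]
  by_cases ht : pvTok line.toList [] = [] <;>
    simp [ht, PySem.Chars.join_nil]

-- A's inner accumulator loop is a map
theorem pvCleanWordsA_foldl (c : String → Bool) (f g : String → String)
    (ws : List String) (acc : List String) :
    ws.foldl (fun a w => if c w then a ++ [f w] else a ++ [g w]) acc
      = acc ++ ws.map (fun w => if c w then f w else g w) := by
  induction ws generalizing acc with
  | nil => simp
  | cons w ws ih =>
    simp only [List.foldl_cons, List.map_cons]
    by_cases h : c w <;> simp [h, ih]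

-- per-line: A's sanitized line equals B's automaton output
theorem lineA_eq_lineB (banned : PySem.Set String) (m : String) :
    PySem.Str.join " " (pvCleanWordsA banned (PySem.Str.split₀ m)) = pvCensorB banned m := by
  rw [← String.toList_inj, censorB_chars]
  unfold pvCleanWordsA
  rw [pvCleanWordsA_foldl, PySem.Str.toList_join]
  have hsep : (" " : String).toList = [' '] := by decide
  rw [hsep, PySem.Str.split₀]
  congr 1
  simp only [List.nil_append, List.map_map]
  apply List.map_congr_left
  intro w _
  simp only [Function.comp_apply, pvMaskB, PySem.Str.lower, String.toList_ofList,
    PySem.Str.len_eq]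
  split_ifs <;> simp

-- the surviving messages, as a function of A's last_message state
def pvKeysFrom : List String → Option String → List String
  | [], _ => []
  | m :: ms, last => if (some m == last) then pvKeysFrom ms last else m :: pvKeysFrom ms (some m)

-- B's pairwise zip filter computes the same surviving messages
theorem zip_dedup_eq (ms : List String) : ∀ (p : Option String),
    ((ms.zip (p :: ms.map some)).filter (fun q => !(some q.1 == q.2))).map (·.1)
      = pvKeysFrom ms p := by
  induction ms with
  | nil => intro p; simp [pvKeysFrom]
  | cons m rest ih =>
    intro p
    simp only [List.map_cons, List.zip_cons_cons, List.filter_cons, pvKeysFrom]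
    by_cases h : some m = p
    · simp [h, ih]
    · simp [h, ih]

-- A's outer loop collects exactly the sanitized surviving messages
theorem foldA_eq (bs : PySem.Set String) (msgs : List String) : ∀ (acc : List String) (last : Option String),
    (msgs.foldl
      (fun (st : List String × Option String) current_msg =>
        if (some current_msg == st.2) then st
        else (st.1 ++ [pvCensorB bs current_msg], some current_msg))
      (acc, last)).1 = acc ++ (pvKeysFrom msgs last).map (pvCensorB bs) := by
  induction msgs with
  | nil => intro acc last; simp [pvKeysFrom]
  | cons m ms ih =>
    intro acc last
    simp only [List.foldl_cons, pvKeysFrom]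
    simp only [beq_iff_eq] at ih ⊢
    by_cases h : some m = last
    · simp [h, ih]
    · simp [h, ih]

-- '\n'.join(lines) + '\n' (nonempty lines) equals ''.join(line + '\n'), on char lists
theorem chars_join_newline (l : List Char) (ls : List (List Char)) :
    PySem.Chars.join ['\n'] (l :: ls) ++ ['\n']
      = PySem.Chars.join [] ((l :: ls).map (fun p => p ++ ['\n'])) := by
  induction ls generalizing l with
  | nil => simp [PySem.Chars.join_singleton]
  | cons l2 ls ih =>
    rw [PySem.Chars.join_cons_cons, List.map_cons, List.map_cons, PySem.Chars.join_cons_cons]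
    have h2 := ih l2
    rw [List.map_cons] at h2
    rw [← h2]
    simp

theorem final_join (lines : List String) :
    (if lines.isEmpty then "" else PySem.Str.join "\n" lines ++ "\n")
      = PySem.Str.join "" (lines.map (fun l => l ++ "\n")) := by
  have hn : ("\n" : String).toList = ['\n'] := by decide
  cases lines with
  | nil =>
    rw [← String.toList_inj]
    simp [PySem.Str.toList_join, PySem.Chars.join_nil]
  | cons l ls =>
    rw [← String.toList_inj]
    simp only [List.isEmpty_cons, if_neg, Bool.false_eq_true, not_false_iff]
    rw [String.toList_append, PySem.Str.toList_join, PySem.Str.toList_join, hn]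
    rw [List.map_cons, chars_join_newline]
    congr 1
    simp [List.map_map, Function.comp_def, String.toList_append, hn]

-- ===== VERDICT (by name: the statement is the Claim_ definition above) =====
theorem sanitize_chat_stream_spec : Claim_equal_sanitize_chat_stream := by
  intro messages banned_words _dom
  unfold Spec_sanitize_chat_stream sanitize_chat_stream sanitize_chat_stream_alt
  simp only [lineA_eq_lineB]
  rw [foldA_eq, List.nil_append, zip_dedup_eq, final_join, List.map_map]
  simp [Function.comp_def]
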